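-- pv_equiv track=rewrite | github.com/NifTK/NifTK | Code/pipelines/nipype/seg-gif/seg_gif_create_template_library.py | generate_unique_pairs
-- ===== SOURCE A (Python) =====
-- def generate_unique_pairs(in_files):
--     files_1 = []
--     files_2 = []
--
--     for i in range(len(in_files)):
--         for j in range(i+1, len(in_files)):
--             files_1.append(in_files[i])
--             files_2.append(in_files[j])
--
--     return files_1, files_2
-- ===== SOURCE B (Python) =====
-- def generate_unique_pairs(in_files):
--     pairs = []
--     rest = list(in_files)
--     while rest:
--         head = rest.pop(0)
--         pairs.extend((head, y) for y in rest)
--     return [a for a, _ in pairs], [b for _, b in pairs]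
-- ===== Notes on version B (the rewrite author's own statement) =====
-- stated objective: alternative
-- what changed: Replaces the index-based nested range loops appending to two accumulators with a head/tail structural pass that materialises the pair list once and then unzips it by projection.
import Mathlib
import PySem

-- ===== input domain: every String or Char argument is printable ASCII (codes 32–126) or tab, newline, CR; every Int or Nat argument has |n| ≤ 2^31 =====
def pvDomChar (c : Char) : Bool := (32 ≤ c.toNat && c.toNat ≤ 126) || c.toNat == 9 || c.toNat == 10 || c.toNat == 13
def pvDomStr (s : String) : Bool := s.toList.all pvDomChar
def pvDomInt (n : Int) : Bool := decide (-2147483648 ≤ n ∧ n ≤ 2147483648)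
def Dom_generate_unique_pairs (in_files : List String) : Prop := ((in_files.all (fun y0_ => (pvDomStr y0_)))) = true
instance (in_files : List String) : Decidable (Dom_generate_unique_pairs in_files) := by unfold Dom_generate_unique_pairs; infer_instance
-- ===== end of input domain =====

-- B replaces A's index-based nested range loops by a head/tail pass building the pair list once, then unzipping by projection (alternative decomposition, same cost).


-- ===== PORT A =====
-- literal port of A's nested index loops; in_files[i]/in_files[j] are always in range, so pyGetD is exact
def generate_unique_pairs (in_files : List String) : List String × List String :=
  (PySem.List.pyRange 0 (PySem.List.len in_files) 1).foldl
    (fun st i =>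
      (PySem.List.pyRange (i + 1) (PySem.List.len in_files) 1).foldl
        (fun st j =>
          (st.1 ++ [PySem.List.pyGetD in_files i ""], st.2 ++ [PySem.List.pyGetD in_files j ""]))
        st)
    ([], [])

-- ===== PORT B =====
-- B's while loop: pop the head, pair it with every remaining element
def pairsOf : List String → List (String × String)
  | [] => []
  | h :: t => t.map (fun y => (h, y)) ++ pairsOf t

def generate_unique_pairs_alt (in_files : List String) : List String × List String :=
  let pairs := pairsOf in_files
  (pairs.map Prod.fst, pairs.map Prod.snd)

-- ===== PRECONDITION & SPEC =====
def Spec_generate_unique_pairs (in_files : List String) (out : List String × List String) : Prop := out = generate_unique_pairs_alt in_files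
instance (in_files : List String) (out : List String × List String) : Decidable (Spec_generate_unique_pairs in_files out) := by unfold Spec_generate_unique_pairs; infer_instance

-- ===== CLAIM (what is proved, stated in full; the proofs are below) =====
def Claim_equal_generate_unique_pairs : Prop := ∀ (in_files : List String), Dom_generate_unique_pairs in_files → Spec_generate_unique_pairs in_files (generate_unique_pairs in_files)

-- ===== LEMMAS AND PROOFS =====

-- A's inner loop appends one constant and one indexed element per step
lemma inner_foldl (l : List Int) (c : String) (g : Int → String) (st : List String × List String) :
    l.foldl (fun st j => (st.1 ++ [c], st.2 ++ [g j])) st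
      = (st.1 ++ l.map (fun _ => c), st.2 ++ l.map g) := by
  induction l generalizing st with
  | nil => simp
  | cons x xs ih => simp [List.foldl_cons, ih]

-- A's outer loop appends two blocks per step
lemma outer_foldl (l : List Int) (f g : Int → List String) (st : List String × List String) :
    l.foldl (fun st i => (st.1 ++ f i, st.2 ++ g i)) st
      = (st.1 ++ l.flatMap f, st.2 ++ l.flatMap g) := by
  induction l generalizing st with
  | nil => simp
  | cons x xs ih => simp [List.foldl_cons, ih]

-- index-pair form of A's output, as one pair list
def pairIdx (xs : List String) : List (String × String) :=
  (PySem.List.pyRange 0 (PySem.List.len xs) 1).flatMap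
    (fun i => (PySem.List.pyRange (i + 1) (PySem.List.len xs) 1).map
      (fun j => (PySem.List.pyGetD xs i "", PySem.List.pyGetD xs j "")))

lemma A_eq_pairIdx (xs : List String) :
    generate_unique_pairs xs = ((pairIdx xs).map Prod.fst, (pairIdx xs).map Prod.snd) := by
  unfold generate_unique_pairs pairIdx
  rw [show (fun (st : List String × List String) i =>
        (PySem.List.pyRange (i + 1) (PySem.List.len xs) 1).foldl
          (fun st j => (st.1 ++ [PySem.List.pyGetD xs i ""], st.2 ++ [PySem.List.pyGetD xs j ""])) st)
      = (fun st i => (st.1 ++ (PySem.List.pyRange (i + 1) (PySem.List.len xs) 1).map (fun _ => PySem.List.pyGetD xs i ""),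
                      st.2 ++ (PySem.List.pyRange (i + 1) (PySem.List.len xs) 1).map (fun j => PySem.List.pyGetD xs j "")))
      from funext fun st => funext fun i => inner_foldl _ _ _ st]
  rw [outer_foldl]
  simp [List.map_flatMap, List.map_map, Function.comp_def]

-- each inner slice of pairIdx is a drop of the list
lemma pairIdx_eq_drop (xs : List String) :
    pairIdx xs = (List.range xs.length).flatMap
      (fun k => (xs.drop (k + 1)).map (fun y => (xs.getD k "", y))) := by
  unfold pairIdx
  rw [PySem.List.pyRange_one]
  simp only [PySem.List.len_eq, Int.sub_zero, Int.toNat_natCast, List.flatMap_map]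
  refine congrArg (fun g => (List.range xs.length).flatMap g) (funext fun k => ?_)
  have h : (PySem.List.pyRange ((0 : Int) + ↑k + 1) (↑xs.length) 1).map
      (fun j => PySem.List.pyGetD xs j "") = xs.drop (k + 1) := by
    have h0 := PySem.List.map_pyGetD_pyRange' xs "" (a := (0 : Int) + ↑k + 1) (by omega)
    simpa using h0
  calc (PySem.List.pyRange ((0:Int) + ↑k + 1) (↑xs.length) 1).map
          (fun j => (PySem.List.pyGetD xs ((0:Int) + ↑k) "", PySem.List.pyGetD xs j ""))
      = ((PySem.List.pyRange ((0:Int) + ↑k + 1) (↑xs.length) 1).map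
          (fun j => PySem.List.pyGetD xs j "")).map
          (fun y => (PySem.List.pyGetD xs ((0:Int) + ↑k) "", y)) := by
        simp [List.map_map, Function.comp_def]
    _ = (xs.drop (k + 1)).map (fun y => (xs.getD k "", y)) := by
        rw [h]
        have : PySem.List.pyGetD xs ((0:Int) + ↑k) "" = xs.getD k "" := by
          simp
        rw [this]

-- the drop form is exactly B's structural pair list
lemma drop_form_eq_pairsOf (xs : List String) :
    (List.range xs.length).flatMap
      (fun k => (xs.drop (k + 1)).map (fun y => (xs.getD k "", y))) = pairsOf xs := by
  induction xs with
  | nil => simp [pairsOf]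
  | cons x t ih =>
    rw [List.length_cons, List.range_succ_eq_map]
    simp only [List.flatMap_cons, List.flatMap_map]
    simp only [List.drop_succ_cons, List.getD_cons_succ, List.getD_cons_zero, List.drop_zero]
    rw [pairsOf]
    exact congrArg (List.map (fun y => (x, y)) t ++ ·) ih

-- ===== VERDICT (by name: the statement is the Claim_ definition above) =====
theorem generate_unique_pairs_spec : Claim_equal_generate_unique_pairs := by
  intro xs _
  unfold Spec_generate_unique_pairs generate_unique_pairs_alt
  rw [A_eq_pairIdx, pairIdx_eq_drop, drop_form_eq_pairsOf]
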